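-- pv_equiv track=rewrite | github.com/skolakoda/ucimo-algoritme | 60-nizovi/najmanjiRazmak.py | najmanjiRazmak
-- ===== SOURCE A (Python) =====
-- def najmanjiRazmak(niz):
--     indeksi = {}
--     min = len(niz)
--     for i in range(len(niz)):
--         n = niz[i]
--         if n in indeksi:
--             razmak = i - indeksi[n]
--             if razmak < min:
--                 min = razmak
--         indeksi[n] = i
--     return min if min < len(niz) else -1
-- ===== SOURCE B (Python) =====
-- def najmanjiRazmak(niz):
--     positions = {}
--     for i, n in enumerate(niz):
--         positions[n] = positions.get(n, []) + [i]
--     gaps = [b - a for idxs in positions.values() for a, b in zip(idxs, idxs[1:])]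
--     return min(gaps) if gaps else -1
-- ===== Notes on version B (the rewrite author's own statement) =====
-- stated objective: alternative
-- what changed: A tracks only the last index of each value and updates a running minimum inside one loop; B first groups all occurrence indices per value into a dict of lists, then takes the minimum of consecutive-index differences over all groups via a comprehension and min(), with -1 for an empty gaps list.
import Mathlib
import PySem

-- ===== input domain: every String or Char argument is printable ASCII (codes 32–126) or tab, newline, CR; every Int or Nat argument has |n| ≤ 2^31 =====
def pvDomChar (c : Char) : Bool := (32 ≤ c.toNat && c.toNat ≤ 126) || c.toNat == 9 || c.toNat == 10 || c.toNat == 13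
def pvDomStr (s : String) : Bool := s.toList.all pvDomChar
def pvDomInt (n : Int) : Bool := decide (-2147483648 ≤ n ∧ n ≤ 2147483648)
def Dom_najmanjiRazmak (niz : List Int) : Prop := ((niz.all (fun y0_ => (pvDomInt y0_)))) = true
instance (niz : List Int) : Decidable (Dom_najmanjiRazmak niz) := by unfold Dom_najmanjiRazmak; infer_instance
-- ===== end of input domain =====

-- B replaces A's single pass with a last-index dict by grouping all indices per value and
-- taking the minimum consecutive-index difference over the groups (objective: alternative).

-- ===== PORT A =====
-- 'for i in range(len(niz)): n = niz[i]' is ported as a fold over pyRange with pyGetD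
-- (the default 0 is never consulted: every j produced by range(len(niz)) is a valid index);
-- 'if n in indeksi: ... indeksi[n]' is ported as one 'match' on get? (contains/lookup agree).
def najmanjiRazmak (niz : List Int) : Int :=
  let st :=
    (PySem.List.pyRange 0 (niz.length : Int) 1).foldl
      (fun (st : PySem.Dict Int Int × Int) j =>
        let n := PySem.List.pyGetD niz j 0
        let m :=
          match st.1.get? n with
          | some jprev =>
            let razmak := j - jprev
            if razmak < st.2 then razmak else st.2
          | none => st.2
        (st.1.insert n j, m))
      (PySem.Dict.empty, (niz.length : Int))
  if st.2 < (niz.length : Int) then st.2 else -1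

-- ===== PORT B =====
-- 'positions[n] = positions.get(n, []) + [i]' over enumerate(niz), then the gaps list
-- comprehension over positions.values(), then 'min(gaps) if gaps else -1' via min?.
def najmanjiRazmak_alt (niz : List Int) : Int :=
  let positions :=
    (PySem.List.enumerate niz).foldl
      (fun (d : PySem.Dict Int (List Int)) p => d.insert p.2 (d.getD p.2 [] ++ [p.1]))
      PySem.Dict.empty
  let gaps := positions.values.flatMap (fun idxs => (idxs.zip idxs.tail).map (fun q => q.2 - q.1))
  match PySem.List.min? gaps (fun y => y) with
  | some m => m
  | none => -1

-- ===== PRECONDITION & SPEC =====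
def Spec_najmanjiRazmak (niz : List Int) (out : Int) : Prop := out = najmanjiRazmak_alt niz
instance (niz : List Int) (out : Int) : Decidable (Spec_najmanjiRazmak niz out) := by unfold Spec_najmanjiRazmak; infer_instance

-- ===== CLAIM (what is proved, stated in full; the proofs are below) =====
def Claim_equal_najmanjiRazmak : Prop := ∀ (niz : List Int), Dom_najmanjiRazmak niz → Spec_najmanjiRazmak niz (najmanjiRazmak niz)

-- ===== LEMMAS AND PROOFS =====

-- indices (in order) at which value v occurs, read off an enumerated list
def pvOccs (v : Int) (l : List (Int × Int)) : List Int :=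
  (l.filter (fun p => p.2 == v)).map (fun p => p.1)

-- consecutive differences of a list
def pvDiffs (o : List Int) : List Int :=
  (o.zip o.tail).map (fun q => q.2 - q.1)

-- A's dict after processing l
def pvFoldIns (d : PySem.Dict Int Int) (l : List (Int × Int)) : PySem.Dict Int Int :=
  l.foldl (fun d p => d.insert p.2 p.1) d

-- the gaps A's loop measures, in the order it measures them
def pvGapsFrom (d : PySem.Dict Int Int) : List (Int × Int) → List Int
  | [] => []
  | p :: t =>
    (match d.get? p.2 with | some j => [p.1 - j] | none => []) ++ pvGapsFrom (d.insert p.2 p.1) t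

-- the gaps B collects: grouped by value, values in first-occurrence order
def pvGapsB (l : List (Int × Int)) : List Int :=
  (PySem.Set.ofList (l.map (fun p => p.2))).flatMap (fun v => pvDiffs (pvOccs v l))

theorem pvOccs_append (v : Int) (l l' : List (Int × Int)) :
    pvOccs v (l ++ l') = pvOccs v l ++ pvOccs v l' := by
  simp [pvOccs]

theorem pvOccs_singleton (v : Int) (p : Int × Int) :
    pvOccs v [p] = if p.2 = v then [p.1] else [] := by
  by_cases h : p.2 = v <;> simp [pvOccs, h]

theorem pvOccs_eq_nil_iff (v : Int) (l : List (Int × Int)) :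
    pvOccs v l = [] ↔ v ∉ l.map (fun p => p.2) := by
  simp [pvOccs, List.filter_eq_nil_iff]
  aesop

theorem pvGapsFrom_append (l l' : List (Int × Int)) (d : PySem.Dict Int Int) :
    pvGapsFrom d (l ++ l') = pvGapsFrom d l ++ pvGapsFrom (pvFoldIns d l) l' := by
  induction l generalizing d with
  | nil => simp [pvGapsFrom, pvFoldIns]
  | cons p t ih => simp [pvGapsFrom, pvFoldIns, ih, List.foldl_cons]

theorem pvGet?_foldIns (l : List (Int × Int)) (d : PySem.Dict Int Int) (v : Int) :
    (pvFoldIns d l).get? v = ((pvOccs v l).getLast?).or (d.get? v) := by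
  induction l generalizing d with
  | nil => simp [pvFoldIns, pvOccs]
  | cons p t ih =>
    have hstep : pvFoldIns d (p :: t) = pvFoldIns (d.insert p.2 p.1) t := rfl
    rw [hstep, ih]
    by_cases hv : p.2 = v
    · subst hv
      rw [PySem.Dict.get?_insert_self]
      have hocc : pvOccs p.2 (p :: t) = p.1 :: pvOccs p.2 t := by
        simp [pvOccs]
      rw [hocc]
      cases h : (pvOccs p.2 t).getLast? with
      | none =>
        have : pvOccs p.2 t = [] := List.getLast?_eq_none_iff.mp h
        simp [this]
      | some j =>
        have hne : pvOccs p.2 t ≠ [] := by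
          intro hnil; rw [hnil] at h; simp at h
        have : (p.1 :: pvOccs p.2 t).getLast? = (pvOccs p.2 t).getLast? := by
          cases hocc2 : pvOccs p.2 t with
          | nil => exact absurd hocc2 hne
          | cons a r => simp
        simp [this, h]
    · rw [PySem.Dict.get?_insert_of_ne _ _ (fun h => hv h.symm)]
      have hocc : pvOccs v (p :: t) = pvOccs v t := by
        simp [pvOccs, hv]
      rw [hocc]

theorem pvDiffs_append_singleton (o : List Int) (i : Int) :
    pvDiffs (o ++ [i]) = pvDiffs o ++ (match o.getLast? with | some j => [i - j] | none => []) := by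
  induction o with
  | nil => simp [pvDiffs]
  | cons a t ih =>
    cases t with
    | nil => simp [pvDiffs]
    | cons b r =>
      have h1 : pvDiffs (a :: b :: r) = (b - a) :: pvDiffs (b :: r) := by
        simp [pvDiffs]
      have h2 : pvDiffs (a :: b :: (r ++ [i])) = (b - a) :: pvDiffs (b :: (r ++ [i])) := by
        simp [pvDiffs]
      have h3 : (a :: b :: r).getLast? = (b :: r).getLast? := List.getLast?_cons_cons
      show pvDiffs (a :: b :: (r ++ [i])) = _
      rw [h2]
      have ih' : pvDiffs (b :: (r ++ [i])) =
          pvDiffs (b :: r) ++ (match (b :: r).getLast? with | some j => [i - j] | none => []) := ih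
      rw [ih', h1, h3, List.cons_append]

theorem pvFlatMap_congr {α β : Type} (l : List α) (f g : α → List β)
    (h : ∀ x ∈ l, f x = g x) : l.flatMap f = l.flatMap g := by
  induction l with
  | nil => simp
  | cons a t ih =>
    simp [List.flatMap_cons, h a (by simp), ih (fun x hx => h x (by simp [hx]))]

theorem pvPerm_mid (a b c : List Int) (g : Int) :
    ((a ++ (b ++ c)) ++ [g]).Perm (a ++ ((b ++ [g]) ++ c)) := by
  refine List.perm_iff_count.mpr ?_
  intro x
  simp [List.count_append, List.count_cons]

theorem pvOfList_append_singleton (xs : List Int) (x : Int) :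
    PySem.Set.ofList (xs ++ [x]) = (PySem.Set.ofList xs).add x := by
  rw [PySem.Set.ofList_eq_foldl, PySem.Set.ofList_eq_foldl, List.foldl_append]
  simp

-- the crux: A's gap sequence is a permutation of B's grouped gap sequence
theorem pvGaps_perm (l : List (Int × Int)) :
    (pvGapsFrom PySem.Dict.empty l).Perm (pvGapsB l) := by
  induction l using List.reverseRecOn with
  | nil => simp [pvGapsFrom, pvGapsB, pvOccs]
  | append_singleton l p ih =>
    have hL : pvGapsFrom PySem.Dict.empty (l ++ [p]) =
        pvGapsFrom PySem.Dict.empty l ++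
          (match (pvOccs p.2 l).getLast? with | some j => [p.1 - j] | none => []) := by
      rw [pvGapsFrom_append]
      have : pvGapsFrom (pvFoldIns PySem.Dict.empty l) [p] =
          (match (pvFoldIns PySem.Dict.empty l).get? p.2 with
            | some j => [p.1 - j] | none => []) := by
        simp [pvGapsFrom]
      rw [this, pvGet?_foldIns]
      simp [PySem.Dict.get?_empty]
    have hocc : ∀ w, pvOccs w (l ++ [p]) = pvOccs w l ++ (if p.2 = w then [p.1] else []) := by
      intro w; rw [pvOccs_append, pvOccs_singleton]
    have hset : PySem.Set.ofList ((l ++ [p]).map (fun q => q.2)) =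
        (PySem.Set.ofList (l.map (fun q => q.2))).add p.2 := by
      rw [List.map_append]; simp [pvOfList_append_singleton]
    by_cases hv : p.2 ∈ l.map (fun q => q.2)
    · -- value seen before: the group for p.2 gains one trailing gap
      have hmemS : p.2 ∈ PySem.Set.ofList (l.map (fun q => q.2)) :=
        (PySem.Set.mem_ofList _ _).mpr hv
      have hoccne : pvOccs p.2 l ≠ [] := by
        intro h; exact ((pvOccs_eq_nil_iff _ _).mp h) hv
      obtain ⟨j, hj⟩ : ∃ j, (pvOccs p.2 l).getLast? = some j := by
        cases h : (pvOccs p.2 l).getLast? with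
        | none => exact absurd (List.getLast?_eq_none_iff.mp h) hoccne
        | some j => exact ⟨j, rfl⟩
      have hadd : (PySem.Set.ofList (l.map (fun q => q.2))).add p.2 =
          PySem.Set.ofList (l.map (fun q => q.2)) := PySem.Set.add_of_mem hmemS
      obtain ⟨s1, s2, hs⟩ := List.append_of_mem hmemS
      have hnd : (PySem.Set.ofList (l.map (fun q => q.2))).Nodup := PySem.Set.nodup_ofList _
      rw [hs] at hnd
      have hns1 : p.2 ∉ s1 := by
        intro h; exact (List.disjoint_of_nodup_append hnd) h (by simp)
      have hns2 : p.2 ∉ s2 := by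
        have := List.Nodup.of_append_right hnd
        simp at this; exact this.1
      have hA : s1.flatMap (fun v => pvDiffs (pvOccs v (l ++ [p]))) =
          s1.flatMap (fun v => pvDiffs (pvOccs v l)) :=
        pvFlatMap_congr _ _ _ (fun w hw => by
          rw [hocc w, if_neg (fun h => hns1 (by rw [h]; exact hw))]; simp)
      have hC : s2.flatMap (fun v => pvDiffs (pvOccs v (l ++ [p]))) =
          s2.flatMap (fun v => pvDiffs (pvOccs v l)) :=
        pvFlatMap_congr _ _ _ (fun w hw => by
          rw [hocc w, if_neg (fun h => hns2 (by rw [h]; exact hw))]; simp)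
      have hBv : pvDiffs (pvOccs p.2 (l ++ [p])) = pvDiffs (pvOccs p.2 l) ++ [p.1 - j] := by
        rw [hocc p.2, if_pos rfl, pvDiffs_append_singleton, hj]
      have hgB : pvGapsB (l ++ [p]) =
          s1.flatMap (fun v => pvDiffs (pvOccs v l)) ++
            ((pvDiffs (pvOccs p.2 l) ++ [p.1 - j]) ++
              s2.flatMap (fun v => pvDiffs (pvOccs v l))) := by
        rw [pvGapsB, hset, hadd, hs, List.flatMap_append, List.flatMap_cons, hA, hC, hBv]
      have hgBold : pvGapsB l =
          s1.flatMap (fun v => pvDiffs (pvOccs v l)) ++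
            (pvDiffs (pvOccs p.2 l) ++
              s2.flatMap (fun v => pvDiffs (pvOccs v l))) := by
        rw [pvGapsB, hs, List.flatMap_append, List.flatMap_cons]
      rw [hL, hj, hgB]
      have hmid := pvPerm_mid (s1.flatMap (fun v => pvDiffs (pvOccs v l)))
        (pvDiffs (pvOccs p.2 l)) (s2.flatMap (fun v => pvDiffs (pvOccs v l))) (p.1 - j)
      have h2 : (pvGapsB l ++ [p.1 - j]).Perm
          (s1.flatMap (fun v => pvDiffs (pvOccs v l)) ++
            ((pvDiffs (pvOccs p.2 l) ++ [p.1 - j]) ++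
              s2.flatMap (fun v => pvDiffs (pvOccs v l)))) := by
        rw [hgBold]; exact hmid
      exact (ih.append_right _).trans h2
    · -- fresh value: no new gap, a new singleton group with no diffs
      have hocc0 : pvOccs p.2 l = [] := (pvOccs_eq_nil_iff _ _).mpr hv
      have hnmemS : p.2 ∉ PySem.Set.ofList (l.map (fun q => q.2)) := by
        rw [PySem.Set.mem_ofList]; exact hv
      have hL2 : pvGapsFrom PySem.Dict.empty (l ++ [p]) = pvGapsFrom PySem.Dict.empty l := by
        rw [hL, hocc0]; simp
      have hgB : pvGapsB (l ++ [p]) = pvGapsB l := by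
        rw [pvGapsB, hset, PySem.Set.add_of_not_mem hnmemS, List.flatMap_append]
        have h1 : (PySem.Set.ofList (l.map (fun q => q.2))).flatMap
            (fun v => pvDiffs (pvOccs v (l ++ [p]))) = pvGapsB l := by
          rw [pvGapsB]
          exact pvFlatMap_congr _ _ _ (fun w hw => by
            rw [hocc w, if_neg (fun h => hnmemS (by rw [h]; exact hw))]; simp)
        have h2 : ([p.2] : List Int).flatMap (fun v => pvDiffs (pvOccs v (l ++ [p]))) = [] := by
          simp [hocc p.2, hocc0, pvDiffs]
        rw [h1, h2, List.append_nil]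
      rw [hL2, hgB]; exact ih

-- A's loop, characterised: final dict and the running minimum over pvGapsFrom
theorem pvFoldA (l : List (Int × Int)) (d : PySem.Dict Int Int) (m : Int) :
    l.foldl
      (fun (st : PySem.Dict Int Int × Int) p =>
        (st.1.insert p.2 p.1,
          match st.1.get? p.2 with
          | some jprev => if p.1 - jprev < st.2 then p.1 - jprev else st.2
          | none => st.2))
      (d, m)
    = (pvFoldIns d l, (pvGapsFrom d l).foldl (fun m r => if r < m then r else m) m) := by
  induction l generalizing d m with
  | nil => simp [pvFoldIns, pvGapsFrom]
  | cons p t ih =>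
    rw [List.foldl_cons]
    cases h : d.get? p.2 with
    | some jprev => simp [h, ih, pvFoldIns, pvGapsFrom]
    | none => simp [h, ih, pvFoldIns, pvGapsFrom]

theorem pvFoldIfMin (l : List Int) (m : Int) :
    l.foldl (fun m r => if r < m then r else m) m = l.foldl min m := by
  induction l generalizing m with
  | nil => rfl
  | cons r t ih =>
    rw [List.foldl_cons, List.foldl_cons, ih]
    congr 1
    omega

-- every gap B collects from enumerate niz is < niz.length
theorem pvGapsB_lt (niz : List Int) (g : Int)
    (hg : g ∈ pvGapsB (PySem.List.enumerate niz)) : g < (niz.length : Int) := by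
  rw [pvGapsB] at hg
  simp only [List.mem_flatMap] at hg
  obtain ⟨v, _, hgd⟩ := hg
  rw [pvDiffs] at hgd
  simp only [List.mem_map] at hgd
  obtain ⟨q, hq, rfl⟩ := hgd
  have hmem := List.of_mem_zip hq
  have hidx : ∀ i ∈ pvOccs v (PySem.List.enumerate niz), 0 ≤ i ∧ i < (niz.length : Int) := by
    intro i hi
    rw [pvOccs] at hi
    simp only [List.mem_map, List.mem_filter] at hi
    obtain ⟨p, ⟨hp, _⟩, rfl⟩ := hi
    rw [PySem.List.mem_enumerate_iff] at hp
    obtain ⟨k, hk, rfl⟩ := hp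
    constructor
    · simp
    · simp
      omega
  have h1 := hidx q.1 hmem.1
  have h2 := hidx q.2 (List.mem_of_mem_tail hmem.2)
  omega

-- B's positions.values() is exactly: for each distinct value (first-occurrence order), its occurrence list
theorem pvPositions_values (niz : List Int) :
    ((PySem.List.enumerate niz).foldl
      (fun (d : PySem.Dict Int (List Int)) p => d.insert p.2 (d.getD p.2 [] ++ [p.1]))
      PySem.Dict.empty).values
    = (PySem.Set.ofList niz).map (fun v => pvOccs v (PySem.List.enumerate niz)) := by
  set E := PySem.List.enumerate niz with hE
  have hkeys : ((E.foldl
      (fun (d : PySem.Dict Int (List Int)) p => d.insert p.2 (d.getD p.2 [] ++ [p.1]))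
      PySem.Dict.empty)).keys = PySem.Set.ofList niz := by
    rw [PySem.Dict.keys_foldl_insert_key E (fun p => p.2)
      (fun d p => d.getD p.2 [] ++ [p.1]) PySem.Dict.empty]
    rw [show (PySem.Dict.empty : PySem.Dict Int (List Int)).keys = [] from rfl]
    rw [PySem.Set.update_nil_left, PySem.List.map_snd_enumerate]
  have hnodup : ((E.foldl
      (fun (d : PySem.Dict Int (List Int)) p => d.insert p.2 (d.getD p.2 [] ++ [p.1]))
      PySem.Dict.empty)).keys.Nodup := by
    rw [hkeys]; exact PySem.Set.nodup_ofList _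
  have hgetD : ∀ v, ((E.foldl
      (fun (d : PySem.Dict Int (List Int)) p => d.insert p.2 (d.getD p.2 [] ++ [p.1]))
      PySem.Dict.empty)).getD v [] = pvOccs v E := by
    intro v
    have hbody : E.foldl
        (fun (d : PySem.Dict Int (List Int)) p => d.insert p.2 (d.getD p.2 [] ++ [p.1]))
        PySem.Dict.empty
      = (E.map Prod.swap).foldl
        (fun (d : PySem.Dict Int (List Int)) p => d.modify p.1 [] (· ++ [p.2]))
        PySem.Dict.empty := by
      rw [List.foldl_map]
      rfl
    rw [hbody, PySem.Dict.getD_foldl_modify_append]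
    rw [pvOccs]
    simp [List.filter_map, Function.comp_def, Prod.swap]
  rw [PySem.Dict.values_eq_map_keys _ hnodup [], hkeys]
  exact List.map_congr_left (fun v _ => hgetD v)

-- ===== VERDICT (by name: the statement is the Claim_ definition above) =====
theorem najmanjiRazmak_spec : Claim_equal_najmanjiRazmak := by
  intro niz _
  unfold Spec_najmanjiRazmak najmanjiRazmak najmanjiRazmak_alt
  set E := PySem.List.enumerate niz with hE
  set n : Int := (niz.length : Int) with hn
  -- rewrite A's range loop as a loop over enumerate
  have hAloop :
      (PySem.List.pyRange 0 n 1).foldl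
        (fun (st : PySem.Dict Int Int × Int) j =>
          let nn := PySem.List.pyGetD niz j 0
          let m :=
            match st.1.get? nn with
            | some jprev =>
              let razmak := j - jprev
              if razmak < st.2 then razmak else st.2
            | none => st.2
          (st.1.insert nn j, m))
        (PySem.Dict.empty, n)
      = E.foldl
        (fun (st : PySem.Dict Int Int × Int) p =>
          (st.1.insert p.2 p.1,
            match st.1.get? p.2 with
            | some jprev => if p.1 - jprev < st.2 then p.1 - jprev else st.2
            | none => st.2))
        (PySem.Dict.empty, n) := by
    rw [hE, PySem.List.enumerate_eq_map_pyRange niz 0, List.foldl_map]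
    rfl
  rw [hAloop, pvFoldA, pvFoldIfMin]
  have hpv := pvPositions_values niz
  rw [← hE] at hpv
  simp only [hpv]
  have hgapsB : ((PySem.Set.ofList niz).map (fun v => pvOccs v E)).flatMap
      (fun idxs => (idxs.zip idxs.tail).map (fun q => q.2 - q.1)) = pvGapsB E := by
    rw [pvGapsB, hE, PySem.List.map_snd_enumerate, List.flatMap_map]
    rfl
  rw [hgapsB]
  have hperm : (pvGapsFrom PySem.Dict.empty E).Perm (pvGapsB E) := pvGaps_perm E
  cases hB : pvGapsB E with
  | nil =>
    have hnilA : pvGapsFrom PySem.Dict.empty E = [] := by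
      rw [hB] at hperm; exact hperm.eq_nil
    rw [hnilA]
    have hm : PySem.List.min? ([] : List Int) (fun y => y) = none :=
      (PySem.List.min?_eq_none_iff _ _).mpr rfl
    rw [hm]
    simp
  | cons x t =>
    have hfold : (pvGapsFrom PySem.Dict.empty E).foldl min n = (x :: t).foldl min n := by
      rw [hB] at hperm
      exact hperm.foldl_eq n
    rw [hfold, PySem.List.min?_id_cons]
    have hx : x < n := pvGapsB_lt niz x (by rw [hB]; simp)
    have hminnx : min n x = x := by omega
    rw [List.foldl_cons, hminnx]
    have hle := (PySem.List.foldl_min_le t x).1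
    rw [if_pos (by omega)]
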